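-- pv_equiv track=rewrite | github.com/97danielj/Python-Competitive-Programming-Team-Notes | Grid/Adventurers' Guild.py | solution
-- ===== SOURCE A (Python) =====
-- def solution(fear_list):
--     fear_list = list(map(int, fear_list))
--     fear_list.sort()
--
--     group_member = 0
--     group_count = 0
--     for fear in fear_list:
--          group_member += 1
--          if group_member >= fear:
--              group_count += 1
--              group_member = 0
--
--     return group_count
-- ===== SOURCE B (Python) =====
-- def solution(fear_list):
--     counts = {}
--     for x in fear_list:
--         f = int(x)
--         counts[f] = counts.get(f, 0) + 1
--     group_count = 0
--     carry = 0
--     for f in sorted(counts):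
--         c = counts[f]
--         if f > 0:
--             total = carry + c
--             group_count += total // f
--             carry = total % f
--         else:
--             group_count += c
--             carry = 0
--     return group_count
-- ===== Notes on version B (the rewrite author's own statement) =====
-- stated objective: alternative
-- what changed: Instead of sorting all members and simulating the greedy group-filling member by member, B counts multiplicities in a dict and walks the distinct fear values in ascending order, turning each run of equal fears into one //-and-% computation with a carried remainder (non-positive fears each form their own group in bulk).
import Mathlib
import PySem

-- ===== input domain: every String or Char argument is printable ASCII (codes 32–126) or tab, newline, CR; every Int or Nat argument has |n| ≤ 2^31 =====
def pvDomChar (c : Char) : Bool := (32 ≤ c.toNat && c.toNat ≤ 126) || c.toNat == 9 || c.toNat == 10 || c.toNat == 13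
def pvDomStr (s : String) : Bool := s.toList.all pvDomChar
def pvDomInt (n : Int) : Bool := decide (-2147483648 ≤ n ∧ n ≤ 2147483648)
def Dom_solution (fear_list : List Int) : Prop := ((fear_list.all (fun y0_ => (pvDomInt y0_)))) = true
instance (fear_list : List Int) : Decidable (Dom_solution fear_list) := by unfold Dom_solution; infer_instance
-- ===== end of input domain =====

-- B replaces A's member-by-member greedy over the fully sorted list by run-length arithmetic
-- over the distinct sorted fear values with a carried remainder (objective: alternative).

-- ===== PORT A =====
-- one loop iteration of A: group_member += 1; if group_member >= fear: group_count += 1; group_member = 0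
def solutionStepA (st : Int × Int) (fear : Int) : Int × Int :=
  let gm := st.1 + 1
  if gm ≥ fear then (0, st.2 + 1) else (gm, st.2)

def solution (fear_list : List Int) : Int :=
  let fl := fear_list.map (fun x => x)          -- list(map(int, fear_list)) : int() is the identity on ints
  let sortedFl := PySem.List.sorted fl (fun x => x) false   -- fear_list.sort()
  (sortedFl.foldl solutionStepA (0, 0)).2

-- ===== PORT B =====
def solution_alt (fear_list : List Int) : Int :=
  -- counts[f] = counts.get(f, 0) + 1 over fear_list (int() is the identity on ints)
  let counts := fear_list.foldl (fun (d : PySem.Dict Int Int) x => d.insert x (d.getD x 0 + 1)) PySem.Dict.empty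
  -- for f in sorted(counts): bulk arithmetic per distinct value, state = (group_count, carry)
  (((PySem.List.sorted counts.keys (fun x => x) false).foldl
      (fun (st : Int × Int) f =>
        let c := counts.getD f 0
        if f > 0 then
          let total := st.2 + c
          (st.1 + PySem.Int.floordiv total f, PySem.Int.mod total f)
        else (st.1 + c, 0)) (0, 0))).1

-- ===== PRECONDITION & SPEC =====
def Spec_solution (fear_list : List Int) (out : Int) : Prop := out = solution_alt fear_list
instance (fear_list : List Int) (out : Int) : Decidable (Spec_solution fear_list out) := by unfold Spec_solution; infer_instance

-- ===== CLAIM (what is proved, stated in full; the proofs are below) =====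
def Claim_equal_solution : Prop := ∀ (fear_list : List Int), Dom_solution fear_list → Spec_solution fear_list (solution fear_list)

-- ===== LEMMAS AND PROOFS =====

-- a run of c copies of a positive fear f, entered with 0 ≤ carry m < f, folds to (total % f, g + total // f)
lemma runPos (f : Int) (hf : 0 < f) :
    ∀ (c : Nat) (m g : Int), 0 ≤ m → m < f →
      (List.replicate c f).foldl solutionStepA (m, g)
        = (PySem.Int.mod (m + c) f, g + PySem.Int.floordiv (m + c) f) := by
  intro c
  induction c with
  | zero =>
    intro m g hm hlt
    simp only [List.replicate, List.foldl_nil, Nat.cast_zero, add_zero]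
    rw [PySem.Int.mod_eq_emod_of_pos hf, PySem.Int.floordiv_eq_ediv_of_pos hf,
        Int.emod_eq_of_lt hm hlt, Int.ediv_eq_zero_of_lt hm hlt, add_zero]
  | succ c ih =>
    intro m g hm hlt
    simp only [List.replicate_succ, List.foldl_cons]
    by_cases h : m + 1 ≥ f
    · have hmf : m + 1 = f := by omega
      have : solutionStepA (m, g) f = (0, g + 1) := by
        simp [solutionStepA, h]
      rw [this, ih 0 (g + 1) le_rfl hf]
      have harg : (0 : Int) + (c : Int) = (c : Int) := by ring
      rw [harg]
      have htot : m + ((c : Nat) + 1 : Nat) = (c : Int) + f * 1 := by push_cast; omega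
      rw [htot]
      rw [PySem.Int.mod_eq_emod_of_pos hf, PySem.Int.mod_eq_emod_of_pos hf,
          PySem.Int.floordiv_eq_ediv_of_pos hf, PySem.Int.floordiv_eq_ediv_of_pos hf,
          Int.add_mul_emod_self_left, Int.add_mul_ediv_left _ _ (by omega : f ≠ 0)]
      rw [Prod.mk.injEq]
      exact ⟨rfl, by ring⟩
    · have : solutionStepA (m, g) f = (m + 1, g) := by
        simp [solutionStepA, h]
      rw [this, ih (m + 1) g (by omega) (by omega)]
      have harg : (m + 1) + (c : Int) = m + ((c : Nat) + 1 : Nat) := by push_cast; ring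
      rw [harg]

-- a nonempty run of a non-positive fear: every member forms its own group, carry resets to 0
lemma runNonpos (f : Int) (hf : f ≤ 0) :
    ∀ (c : Nat), 0 < c → ∀ (m g : Int), 0 ≤ m →
      (List.replicate c f).foldl solutionStepA (m, g) = (0, g + c) := by
  intro c
  induction c with
  | zero => intro h; omega
  | succ c ih =>
    intro _ m g hm
    simp only [List.replicate_succ, List.foldl_cons]
    have hstep : solutionStepA (m, g) f = (0, g + 1) := by
      simp only [solutionStepA]
      rw [if_pos (by omega)]
    rw [hstep]
    by_cases hc : 0 < c
    · rw [ih hc 0 (g + 1) le_rfl]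
      push_cast; ring_nf
    · have : c = 0 := by omega
      subst this
      simp
-- the B-side fold (abstract count function)
def solutionStepB (cnt : Int → Nat) (st : Int × Int) (f : Int) : Int × Int :=
  if f > 0 then
    (st.1 + PySem.Int.floordiv (st.2 + cnt f) f, PySem.Int.mod (st.2 + cnt f) f)
  else (st.1 + cnt f, 0)

-- main bridge: A's fold over the concatenated runs equals B's fold over the distinct keys
lemma mainFold (cnt : Int → Nat) :
    ∀ (ks : List Int), ks.Pairwise (· < ·) → (∀ k ∈ ks, 0 < cnt k) →
      ∀ (m g : Int), 0 ≤ m → (∀ k ∈ ks, 0 < k → m < k) →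
        ((ks.flatMap fun k => List.replicate (cnt k) k).foldl solutionStepA (m, g)).2
          = (ks.foldl (solutionStepB cnt) (g, m)).1 := by
  intro ks
  induction ks with
  | nil => intro _ _ m g _ _; simp
  | cons k rest ih =>
    intro hpw hpos m g hm hcarry
    have hpw' := (List.pairwise_cons.mp hpw)
    simp only [List.flatMap_cons, List.foldl_append, List.foldl_cons]
    by_cases hk : 0 < k
    · have hmk : m < k := hcarry k (List.mem_cons_self) hk
      rw [runPos k hk (cnt k) m g hm hmk]
      have hB : solutionStepB cnt (g, m) k
          = (g + PySem.Int.floordiv (m + cnt k) k, PySem.Int.mod (m + cnt k) k) := by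
        simp [solutionStepB, hk]
      rw [hB]
      exact ih hpw'.2 (fun k' hk' => hpos k' (List.mem_cons_of_mem _ hk'))
        (PySem.Int.mod (m + cnt k) k) _ (PySem.Int.mod_nonneg _ hk)
        (fun k' hk' _ => lt_trans (PySem.Int.mod_lt _ hk) (hpw'.1 k' hk'))
    · push Not at hk
      rw [runNonpos k hk (cnt k) (hpos k List.mem_cons_self) m g hm]
      have hB : solutionStepB cnt (g, m) k = (g + cnt k, 0) := by
        simp only [solutionStepB]
        rw [if_neg (by omega)]
      rw [hB]
      exact ih hpw'.2 (fun k' hk' => hpos k' (List.mem_cons_of_mem _ hk'))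
        0 _ le_rfl (fun k' _ hk' => hk')

-- counts of a flatMap of replicate-runs over distinct keys
lemma count_flatMap_replicate (cnt : Int → Nat) :
    ∀ (ks : List Int), ks.Nodup → ∀ (x : Int),
      (ks.flatMap fun k => List.replicate (cnt k) k).count x
        = if x ∈ ks then cnt x else 0 := by
  intro ks
  induction ks with
  | nil => simp
  | cons k rest ih =>
    intro hnd x
    have hnd' := List.nodup_cons.mp hnd
    simp only [List.flatMap_cons, List.count_append, List.count_replicate, ih hnd'.2 x]
    by_cases hx : x = k
    · subst hx
      simp [hnd'.1]
    · simp [hx, Ne.symm hx]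

-- the concatenation of runs over strictly increasing keys is weakly sorted
lemma pairwise_le_flatMap_replicate (cnt : Int → Nat) :
    ∀ (ks : List Int), ks.Pairwise (· < ·) →
      (ks.flatMap fun k => List.replicate (cnt k) k).Pairwise (· ≤ ·) := by
  intro ks
  induction ks with
  | nil => simp
  | cons k rest ih =>
    intro hpw
    have hpw' := List.pairwise_cons.mp hpw
    simp only [List.flatMap_cons]
    apply List.pairwise_append.mpr
    refine ⟨?_, ih hpw'.2, ?_⟩
    · exact List.pairwise_replicate.mpr (Or.inr le_rfl)
    · intro a ha b hb
      have hak : a = k := List.eq_of_mem_replicate ha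
      obtain ⟨k', hk', hbk'⟩ := List.mem_flatMap.mp hb
      have hb' : b = k' := List.eq_of_mem_replicate hbk'
      rw [hak, hb']
      exact le_of_lt (hpw'.1 k' hk')

-- ===== VERDICT (by name: the statement is the Claim_ definition above) =====
theorem solution_spec : Claim_equal_solution := by
  intro L _
  unfold Spec_solution solution solution_alt
  simp only [List.map_id']
  rw [PySem.Dict.foldl_insert_getD_add_one_eq_counter]
  simp only [PySem.Dict.getD_counter, PySem.Dict.keys_counter]
  set ks := PySem.List.sorted (PySem.Set.ofList L) (fun x => x) false with hks
  have hpw : ks.Pairwise (· < ·) := PySem.List.sorted_ofList_pairwise_lt L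
  have hmem : ∀ x, x ∈ ks ↔ x ∈ L := by
    intro x
    rw [hks, PySem.List.mem_sorted, PySem.Set.mem_ofList]
  have hnd : ks.Nodup := hpw.imp (fun h => ne_of_lt h)
  have hpos : ∀ k ∈ ks, 0 < L.count k := by
    intro k hk
    exact List.count_pos_iff.mpr ((hmem k).mp hk)
  -- the sorted input is exactly the concatenation of the runs
  have hsorted : PySem.List.sorted L (fun x => x) false
      = ks.flatMap fun k => List.replicate (L.count k) k := by
    apply PySem.List.sorted_id_eq_of_perm_of_pairwise
    · apply List.perm_iff_count.mpr
      intro x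
      rw [count_flatMap_replicate (fun k => L.count k) ks hnd x]
      by_cases hx : x ∈ ks
      · simp [hx]
      · have : x ∉ L := fun h => hx ((hmem x).mpr h)
        simp [hx, List.count_eq_zero_of_not_mem this]
    · exact pairwise_le_flatMap_replicate _ ks hpw
  rw [hsorted]
  have := mainFold (fun k => L.count k) ks hpw hpos 0 0 le_rfl (fun _ _ _ => by assumption)
  rw [this]
  rfl
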